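-- pv_equiv track=rewrite | github.com/uk0/ultraworker | src/ultrawork/slack/explorer.py | _summarize_messages
-- ===== SOURCE A (Python) =====
-- from typing import Any
--
-- def _summarize_messages(messages: list[dict[str, Any]], max_length: int = 200) -> str:
--     """Create a brief summary from messages."""
--     if not messages:
--         return ""
--
--     # Combine first few message texts
--     texts = []
--     total_len = 0
--     for msg in messages[:5]:
--         text = msg.get("text", "")[:100]
--         if total_len + len(text) > max_length:
--             break
--         texts.append(text)
--         total_len += len(text)
--
--     return " | ".join(texts)
-- ===== SOURCE B (Python) =====
-- def _summarize_messages(messages: list, max_length: int = 200) -> str: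
--     """Create a brief summary from messages (list-first decomposition, no early-break loop)."""
--     texts = [msg.get("text", "")[:100] for msg in messages[:5]]
--     cums = [sum(len(t) for t in texts[:i + 1]) for i in range(len(texts))]
--     k = sum(1 for c in cums if c <= max_length)
--     return " | ".join(texts[:k])
-- ===== Notes on version B (the rewrite author's own statement) =====
-- stated objective: alternative
-- what changed: Replaces the stateful early-break accumulation loop (with a separate empty-input guard) by a declarative pipeline: build all truncated texts, compute cumulative lengths, count how many prefixes fit, then join a slice; correctness of the count-instead-of-break relies on cumulative lengths being monotone.
import Mathlib
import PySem

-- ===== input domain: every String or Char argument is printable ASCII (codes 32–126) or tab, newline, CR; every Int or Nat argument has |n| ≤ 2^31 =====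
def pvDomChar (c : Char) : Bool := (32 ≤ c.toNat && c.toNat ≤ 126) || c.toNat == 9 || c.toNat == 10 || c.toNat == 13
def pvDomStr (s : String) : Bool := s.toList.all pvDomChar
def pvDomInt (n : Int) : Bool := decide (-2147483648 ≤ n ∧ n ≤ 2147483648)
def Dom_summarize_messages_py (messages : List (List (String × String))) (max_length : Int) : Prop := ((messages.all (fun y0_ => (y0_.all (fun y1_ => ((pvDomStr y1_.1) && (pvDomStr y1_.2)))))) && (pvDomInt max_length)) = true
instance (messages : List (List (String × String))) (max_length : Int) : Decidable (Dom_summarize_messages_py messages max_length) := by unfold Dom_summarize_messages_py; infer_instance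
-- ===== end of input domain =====

-- B replaces A's stateful early-break loop (plus empty-input guard) by a declarative pipeline:
-- map-truncate all texts, compute cumulative lengths, count the fitting prefixes, join a slice
-- (objective: alternative decomposition; same behaviour).

-- ===== PORT A =====
-- A's loop body, named so the fold is readable (identical to the Python loop body).
def pvStepA (max_length : Int) (st : List String × Int × Bool) (msg : List (String × String)) :
    List String × Int × Bool :=
  if st.2.2 then st
  else
    let text := PySem.Str.slice ((PySem.Dict.mk msg).getD "text" "") none (some 100)
    if st.2.1 + PySem.Str.len text > max_length then (st.1, st.2.1, true)
    else (st.1 ++ [text], st.2.1 + PySem.Str.len text, false)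

def summarize_messages_py (messages : List (List (String × String))) (max_length : Int) : String :=
  if messages = [] then ""
  else
    let st := (PySem.List.slice messages none (some 5)).foldl (pvStepA max_length) ([], 0, false)
    PySem.Str.join " | " st.1

-- ===== PORT B =====
def summarize_messages_py_alt (messages : List (List (String × String))) (max_length : Int) : String :=
  let texts := (PySem.List.slice messages none (some 5)).map
    (fun msg => PySem.Str.slice ((PySem.Dict.mk msg).getD "text" "") none (some 100))
  let cums := (PySem.List.pyRange 0 (texts.length : Int) 1).map
    (fun i => ((PySem.List.slice texts none (some (i + 1))).map PySem.Str.len).sum)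
  let k := cums.countP (fun c => decide (c ≤ max_length))
  PySem.Str.join " | " (PySem.List.slice texts none (some (k : Int)))

-- ===== PRECONDITION & SPEC =====
def Spec_summarize_messages_py (messages : List (List (String × String))) (max_length : Int) (out : String) : Prop := out = summarize_messages_py_alt messages max_length
instance (messages : List (List (String × String))) (max_length : Int) (out : String) : Decidable (Spec_summarize_messages_py messages max_length out) := by unfold Spec_summarize_messages_py; infer_instance

-- ===== CLAIM (what is proved, stated in full; the proofs are below) =====
def Claim_equal_summarize_messages_py : Prop := ∀ (messages : List (List (String × String))) (max_length : Int), Dom_summarize_messages_py messages max_length → Spec_summarize_messages_py messages max_length (summarize_messages_py messages max_length)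

-- ===== LEMMAS AND PROOFS =====

-- The per-message truncated text.
def pvText (msg : List (String × String)) : String :=
  PySem.Str.slice ((PySem.Dict.mk msg).getD "text" "") none (some 100)

-- Common recursive characterisation of the kept prefix of truncated texts.
def pvCore (M : Int) : List String → Int → List String
  | [], _ => []
  | t :: ts, total =>
      if total + PySem.Str.len t > M then []
      else t :: pvCore M ts (total + PySem.Str.len t)

-- A's fold, once stopped, never changes state.
theorem pvFoldStopped (M : Int) (ms : List (List (String × String)))
    (acc : List String) (total : Int) :
    ms.foldl (pvStepA M) (acc, total, true) = (acc, total, true) := by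
  induction ms with
  | nil => rfl
  | cons m ms ih => rw [List.foldl_cons, show pvStepA M (acc, total, true) m = (acc, total, true) from rfl]; exact ih

-- A's fold accumulates exactly pvCore of the truncated texts.
theorem pvFoldCore (M : Int) (ms : List (List (String × String)))
    (acc : List String) (total : Int) :
    (ms.foldl (pvStepA M) (acc, total, false)).1 = acc ++ pvCore M (ms.map pvText) total := by
  induction ms generalizing acc total with
  | nil => simp [pvCore]
  | cons m ms ih =>
    rw [List.foldl_cons,
      show pvStepA M (acc, total, false) m
          = if total + PySem.Str.len (pvText m) > M then (acc, total, true)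
            else (acc ++ [pvText m], total + PySem.Str.len (pvText m), false) from rfl,
      List.map_cons]
    by_cases h : total + PySem.Str.len (pvText m) > M
    · rw [if_pos h, pvFoldStopped]
      simp only [pvCore]
      rw [if_pos h]
      simp
    · rw [if_neg h, ih]
      simp only [pvCore]
      rw [if_neg h]
      simp
      
def pvCums (ts : List String) : List Int :=
  (List.range ts.length).map (fun i => ((ts.take (i + 1)).map PySem.Str.len).sum)

theorem pvCums_cons (t : String) (ts : List String) :
    pvCums (t :: ts) = PySem.Str.len t :: (pvCums ts).map (fun c => PySem.Str.len t + c) := by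
  simp [pvCums, List.range_succ_eq_map, List.map_map, Function.comp]

theorem pvCums_nonneg (ts : List String) : ∀ c ∈ pvCums ts, 0 ≤ c := by
  intro c hc
  simp only [pvCums, List.mem_map, List.mem_range] at hc
  obtain ⟨i, _, rfl⟩ := hc
  apply List.sum_nonneg
  intro x hx
  simp only [List.mem_map] at hx
  obtain ⟨s, _, rfl⟩ := hx
  simp [PySem.Str.len_eq]

-- B's count-then-take equals pvCore.
theorem pvTakeCount (M : Int) (ts : List String) (total : Int) :
    ts.take ((pvCums ts).countP (fun c => decide (total + c ≤ M))) = pvCore M ts total := by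
  induction ts generalizing total with
  | nil => simp [pvCums, pvCore]
  | cons t ts ih =>
    rw [pvCums_cons]
    by_cases h : total + PySem.Str.len t > M
    · have hz : ((PySem.Str.len t :: (pvCums ts).map (fun c => PySem.Str.len t + c)).countP
          (fun c => decide (total + c ≤ M))) = 0 := by
        rw [List.countP_eq_zero]
        intro c hc
        simp only [List.mem_cons, List.mem_map] at hc
        rcases hc with rfl | ⟨c', hc', rfl⟩
        · simp only [decide_eq_true_eq]
          omega
        · have := pvCums_nonneg ts c' hc'
          simp only [decide_eq_true_eq]
          omega
      rw [hz]
      simp only [pvCore]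
      rw [if_pos h]
      rfl
    · have hcnt : ((PySem.Str.len t :: (pvCums ts).map (fun c => PySem.Str.len t + c)).countP
          (fun c => decide (total + c ≤ M)))
          = (pvCums ts).countP (fun c => decide ((total + PySem.Str.len t) + c ≤ M)) + 1 := by
        rw [List.countP_cons, List.countP_map]
        have hh : (decide (total + PySem.Str.len t ≤ M)) = true := by
          simp only [decide_eq_true_eq]; omega
        rw [hh]
        congr 1
        apply List.countP_congr
        intro c _
        simp only [Function.comp_apply, decide_eq_true_eq]
        constructor <;> intro <;> omega
      rw [hcnt, List.take_succ_cons, ih]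
      simp only [pvCore]
      rw [if_neg h]

theorem pvPipeline (M : Int) (ts : List String) :
    PySem.Str.join " | " (PySem.List.slice ts none
      (some ((((PySem.List.pyRange 0 (ts.length : Int) 1).map
        (fun i => ((PySem.List.slice ts none (some (i + 1))).map PySem.Str.len).sum)).countP
          (fun c => decide (c ≤ M)) : Nat) : Int)))
      = PySem.Str.join " | " (pvCore M ts 0) := by
  have hcums : (PySem.List.pyRange 0 (ts.length : Int) 1).map
      (fun i => ((PySem.List.slice ts none (some (i + 1))).map PySem.Str.len).sum)
      = pvCums ts := by
    rw [PySem.List.pyRange_zero_natCast, List.map_map]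
    unfold pvCums
    apply List.map_congr_left
    intro i _
    have h1 : ((i : Int) + 1) = ((i + 1 : Nat) : Int) := by push_cast; ring
    simp only [Function.comp_apply, h1, PySem.List.slice_to_natCast]
  rw [hcums,
    show ((pvCums ts).countP (fun c => decide (c ≤ M)))
        = ((pvCums ts).countP (fun c => decide ((0 : Int) + c ≤ M))) from by
      apply List.countP_congr; intro c _; simp,
    PySem.List.slice_to_natCast, pvTakeCount]

theorem pvAlt_eq (messages : List (List (String × String))) (M : Int) :
    summarize_messages_py_alt messages M =
      PySem.Str.join " | "
        (pvCore M ((PySem.List.slice messages none (some 5)).map pvText) 0) :=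
  pvPipeline M ((PySem.List.slice messages none (some 5)).map pvText)

-- ===== VERDICT (by name: the statement is the Claim_ definition above) =====
theorem summarize_messages_py_spec : Claim_equal_summarize_messages_py := by
  intro messages M _
  unfold Spec_summarize_messages_py
  rw [pvAlt_eq]
  unfold summarize_messages_py
  by_cases h : messages = []
  · subst h
    rw [if_pos rfl,
      show PySem.List.slice ([] : List (List (String × String))) none (some 5) = [] from rfl]
    simp [pvCore, PySem.Str.join]
  · rw [if_neg h]
    show PySem.Str.join " | "
        ((PySem.List.slice messages none (some 5)).foldl (pvStepA M) ([], 0, false)).1 = _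
    rw [pvFoldCore]
    rfl
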